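-- pv_equiv track=rewrite | github.com/udit-asopa/article_to_bib_ris | src/utils.py | drop_truncated_prefix_urls
-- ===== SOURCE A (Python) =====
-- def drop_truncated_prefix_urls(urls: list[str]) -> list[str]:
--     filtered_urls: list[str] = []
--     for candidate in urls:
--         is_truncated_prefix = candidate.endswith("-") and any(
--             other != candidate and other.startswith(candidate) for other in urls
--         )
--         if not is_truncated_prefix:
--             filtered_urls.append(candidate)
--     return filtered_urls
-- ===== SOURCE B (Python) =====
-- def drop_truncated_prefix_urls(urls: list[str]) -> list[str]:
--     # Sort the distinct urls once; a '-'-ending url has a proper extension in the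
--     # list iff its immediate successor in the sorted order starts with it.
--     uniq = sorted(set(urls))
--     drop = set()
--     for a, b in zip(uniq, uniq[1:]):
--         if a.endswith("-") and b.startswith(a):
--             drop.add(a)
--     return [u for u in urls if u not in drop]
-- ===== Notes on version B (the rewrite author's own statement) =====
-- stated objective: alternative
-- what changed: Replaces A's per-candidate any(...) scan of the whole list by sorting the distinct urls once and testing, for each '-'-ending url, whether its immediate successor in sorted order starts with it, then filtering against that precomputed drop set.
import Mathlib
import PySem

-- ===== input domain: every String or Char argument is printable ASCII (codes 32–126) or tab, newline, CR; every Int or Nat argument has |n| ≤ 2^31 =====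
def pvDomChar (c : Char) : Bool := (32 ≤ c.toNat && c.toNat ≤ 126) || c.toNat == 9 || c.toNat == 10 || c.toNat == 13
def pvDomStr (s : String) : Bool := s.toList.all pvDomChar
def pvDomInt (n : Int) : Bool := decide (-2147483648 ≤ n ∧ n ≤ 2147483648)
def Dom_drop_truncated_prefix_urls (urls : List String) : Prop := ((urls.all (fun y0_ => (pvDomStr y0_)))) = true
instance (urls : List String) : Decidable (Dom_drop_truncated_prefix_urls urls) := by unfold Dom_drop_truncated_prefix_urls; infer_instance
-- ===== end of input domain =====

-- B replaces A's per-candidate scan of the whole list by one sorted pass over the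
-- distinct urls: a '-'-ending url has a proper extension iff its immediate successor
-- in sorted order starts with it (objective: alternative algorithm; not measured faster).

-- ===== PORT A =====
def drop_truncated_prefix_urls (urls : List String) : List String :=
  urls.foldl (fun filtered candidate =>
    let is_truncated_prefix :=
      PySem.Str.endswith candidate "-" &&
        urls.any (fun other => !(other == candidate) && PySem.Str.startswith other candidate)
    if !is_truncated_prefix then filtered ++ [candidate] else filtered) []

-- ===== PORT B =====
def pvUniq (urls : List String) : List String :=
  PySem.List.sorted (PySem.Set.ofList urls) (fun x => x) false

def pvDrop (urls : List String) : PySem.Set String :=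
  ((pvUniq urls).zip (PySem.List.slice (pvUniq urls) (some 1) none)).foldl
    (fun d p =>
      if PySem.Str.endswith p.1 "-" && PySem.Str.startswith p.2 p.1 then PySem.Set.add d p.1 else d)
    PySem.Set.empty

def drop_truncated_prefix_urls_alt (urls : List String) : List String :=
  urls.filter (fun u => !PySem.Set.contains (pvDrop urls) u)

-- ===== PRECONDITION & SPEC =====
def Spec_drop_truncated_prefix_urls (urls : List String) (out : List String) : Prop := out = drop_truncated_prefix_urls_alt urls
instance (urls : List String) (out : List String) : Decidable (Spec_drop_truncated_prefix_urls urls out) := by unfold Spec_drop_truncated_prefix_urls; infer_instance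

-- ===== CLAIM (what is proved, stated in full; the proofs are below) =====
def Claim_equal_drop_truncated_prefix_urls : Prop := ∀ (urls : List String), Dom_drop_truncated_prefix_urls urls → Spec_drop_truncated_prefix_urls urls (drop_truncated_prefix_urls urls)


-- ===== LEMMAS AND PROOFS =====

-- proper prefix is lexicographically smaller
theorem pv_lex_of_prefix : ∀ {u o : List Char}, u <+: o → u ≠ o → List.Lex (· < ·) u o := by
  intro u
  induction u with
  | nil =>
    intro o _ hne
    cases o with
    | nil => exact absurd rfl hne
    | cons c t => exact List.Lex.nil
  | cons x u' ih =>
    intro o hp hne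
    cases o with
    | nil => simp at hp
    | cons y o' =>
      rw [List.cons_prefix_cons] at hp
      obtain ⟨hx, hp'⟩ := hp
      subst hx
      exact List.Lex.cons (ih hp' (fun h => hne (by rw [h])))

-- strings extending u form a contiguous block in the order: u < s, s ≤ t, u prefix of t ⇒ u prefix of s
theorem pv_prefix_sandwich : ∀ (u s t : List Char), u <+: t →
    List.Lex (· < ·) u s → (List.Lex (· < ·) s t ∨ s = t) → u <+: s := by
  intro u
  induction u with
  | nil => intro s t _ _ _; exact List.nil_prefix
  | cons x u' ih =>
    intro s t hpt hus hst
    cases s with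
    | nil => cases hus
    | cons y s' =>
      cases t with
      | nil => simp at hpt
      | cons z t' =>
        rw [List.cons_prefix_cons] at hpt
        obtain ⟨hxz, hpt'⟩ := hpt
        subst hxz
        rcases List.cons_lex_cons_iff.mp hus with hxy | ⟨hxy, hus'⟩
        · exfalso
          rcases hst with hlex | heq
          · rcases List.cons_lex_cons_iff.mp hlex with hyx | ⟨hyx, _⟩
            · exact lt_irrefl x (lt_trans hxy hyx)
            · rw [hyx] at hxy; exact lt_irrefl x hxy
          · rw [List.cons.injEq] at heq
            rw [heq.1] at hxy; exact lt_irrefl x hxy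
        · subst hxy
          have hst' : List.Lex (· < ·) s' t' ∨ s' = t' := by
            rcases hst with hlex | heq
            · rcases List.cons_lex_cons_iff.mp hlex with hxx | ⟨-, h⟩
              · exact absurd hxx (lt_irrefl x)
              · exact Or.inl h
            · rw [List.cons.injEq] at heq; exact Or.inr heq.2
          exact List.cons_prefix_cons.mpr ⟨rfl, ih s' t' hpt' hus' hst'⟩

-- Python's string order is code-point lexicographic
theorem pv_str_lt_iff (s t : String) : s < t ↔ List.Lex (· < ·) s.toList t.toList :=
  String.lt_iff_toList_lt.trans (List.lt_iff_lex_lt _ _)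

-- membership in the foldl-built drop set
theorem pv_mem_drop_foldl (q : String × String → Bool) :
    ∀ (l : List (String × String)) (d : PySem.Set String) (u : String),
      u ∈ l.foldl (fun d p => if q p then PySem.Set.add d p.1 else d) d ↔
        u ∈ d ∨ ∃ p ∈ l, q p = true ∧ p.1 = u := by
  intro l
  induction l with
  | nil => intro d u; simp
  | cons p l ih =>
    intro d u
    rw [List.foldl_cons, ih]
    by_cases hq : q p = true
    · simp [hq, PySem.Set.mem_add]
      constructor
      · rintro ((h | h) | h)
        · exact Or.inl h
        · exact Or.inr (Or.inl h.symm)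
        · exact Or.inr (Or.inr h)
      · rintro (h | h | h)
        · exact Or.inl (Or.inl h)
        · exact Or.inl (Or.inr h.symm)
        · exact Or.inr h
    · simp [hq]

-- adjacent pairs via zip with the tail
theorem pv_mem_zip_tail {α : Type} (l : List α) (a b : α) :
    (a, b) ∈ l.zip l.tail ↔ ∃ i, ∃ h : i + 1 < l.length, l[i] = a ∧ l[i+1] = b := by
  rw [List.mem_iff_getElem]
  constructor
  · rintro ⟨i, h, heq⟩
    have hlen : i + 1 < l.length := by
      have h' := h
      rw [List.length_zip, List.length_tail] at h'
      omega
    have hti : i < l.tail.length := by rw [List.length_tail]; omega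
    rw [List.getElem_zip, Prod.mk.injEq] at heq
    exact ⟨i, hlen, heq.1, by rw [← List.getElem_tail hti, heq.2]⟩
  · rintro ⟨i, h, ha, hb⟩
    have hzl : i < (l.zip l.tail).length := by
      rw [List.length_zip, List.length_tail]; omega
    refine ⟨i, hzl, ?_⟩
    have hti : i < l.tail.length := by rw [List.length_tail]; omega
    rw [List.getElem_zip, Prod.mk.injEq]
    exact ⟨ha, by rw [List.getElem_tail hti]; exact hb⟩

-- the heart: a proper extension exists in urls ⇔ the sorted successor extends u
theorem pv_main (urls : List String) (u : String) (hu : u ∈ urls) :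
    (∃ o ∈ urls, o ≠ u ∧ u.toList <+: o.toList) ↔
      ∃ i, ∃ h : i + 1 < (pvUniq urls).length,
        (pvUniq urls)[i] = u ∧ u.toList <+: ((pvUniq urls)[i+1]).toList := by
  have hmemL : ∀ x, x ∈ pvUniq urls ↔ x ∈ urls := by
    intro x
    unfold pvUniq
    rw [PySem.List.mem_sorted, PySem.Set.mem_ofList]
  have hpw : (pvUniq urls).Pairwise (· < ·) := PySem.List.sorted_ofList_pairwise_lt urls
  have hstrict := List.pairwise_iff_getElem.mp hpw
  constructor
  · rintro ⟨o, ho, hne, hpre⟩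
    obtain ⟨i, hi, hiu⟩ := List.mem_iff_getElem.mp ((hmemL u).mpr hu)
    obtain ⟨j, hj, hjo⟩ := List.mem_iff_getElem.mp ((hmemL o).mpr ho)
    have hlu : u.toList ≠ o.toList := fun h => hne (String.toList_inj.mp h).symm
    have huo : u < o := (pv_str_lt_iff u o).mpr (pv_lex_of_prefix hpre hlu)
    have hij : i < j := by
      rcases Nat.lt_trichotomy i j with h | h | h
      · exact h
      · exfalso
        subst h
        apply hne
        rw [← hjo, hiu]
      · exfalso
        have hlt := hstrict j i hj hi h
        rw [hiu, hjo] at hlt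
        exact lt_irrefl u (lt_trans huo hlt)
    have hsucc : i + 1 < (pvUniq urls).length := by omega
    refine ⟨i, hsucc, hiu, ?_⟩
    have h1 : u < (pvUniq urls)[i+1] := by
      have := hstrict i (i+1) hi hsucc (by omega)
      rwa [hiu] at this
    have h2 : List.Lex (· < ·) ((pvUniq urls)[i+1]).toList o.toList ∨
        ((pvUniq urls)[i+1]).toList = o.toList := by
      rcases Nat.eq_or_lt_of_le (show i + 1 ≤ j by omega) with heq | hlt
      · right
        subst heq
        rw [hjo]
      · left
        have := hstrict (i+1) j hsucc hj hlt
        rw [hjo] at this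
        exact (pv_str_lt_iff _ _).mp this
    exact pv_prefix_sandwich u.toList ((pvUniq urls)[i+1]).toList o.toList hpre
      ((pv_str_lt_iff _ _).mp h1) h2
  · rintro ⟨i, h, hiu, hpre⟩
    refine ⟨(pvUniq urls)[i+1], (hmemL _).mp (List.getElem_mem h), ?_, hpre⟩
    intro heq
    have := hstrict i (i+1) (by omega) h (by omega)
    rw [hiu, heq] at this
    exact lt_irrefl u this

-- characterizations of the two ports
theorem pv_A_eq_filter (urls : List String) :
    drop_truncated_prefix_urls urls = urls.filter (fun c =>
      !(PySem.Str.endswith c "-" &&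
        urls.any (fun other => !(other == c) && PySem.Str.startswith other c))) := by
  unfold drop_truncated_prefix_urls
  have := PySem.List.foldl_append_if (fun c =>
      !(PySem.Str.endswith c "-" &&
        urls.any (fun other => !(other == c) && PySem.Str.startswith other c))) id urls []
  simpa using this

-- ===== VERDICT (by name: the statement is the Claim_ definition above) =====
theorem drop_truncated_prefix_urls_spec : Claim_equal_drop_truncated_prefix_urls := by
  intro urls _
  unfold Spec_drop_truncated_prefix_urls drop_truncated_prefix_urls_alt
  rw [pv_A_eq_filter]
  apply List.filter_congr
  intro u hu
  congr 1
  by_cases hend : PySem.Str.endswith u "-" = true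
  · -- both reduce to the existence question
    have hzip : PySem.List.slice (pvUniq urls) (some 1) none = (pvUniq urls).tail := by
      rw [PySem.List.slice_from (pvUniq urls) (show (0:Int) ≤ 1 by norm_num)]
      simp
    have hmem : u ∈ pvDrop urls ↔
        ∃ p ∈ (pvUniq urls).zip (pvUniq urls).tail,
          (PySem.Str.endswith p.1 "-" && PySem.Str.startswith p.2 p.1) = true ∧ p.1 = u := by
      unfold pvDrop
      rw [hzip, pv_mem_drop_foldl]
      simp [PySem.Set.empty]
    have hA : (urls.any (fun other => !(other == u) && PySem.Str.startswith other u)) = true ↔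
        (∃ o ∈ urls, o ≠ u ∧ u.toList <+: o.toList) := by
      rw [List.any_eq_true]
      constructor
      · rintro ⟨o, ho, hcond⟩
        rw [Bool.and_eq_true, Bool.not_eq_true', beq_eq_false_iff_ne] at hcond
        refine ⟨o, ho, hcond.1, ?_⟩
        have := hcond.2
        rw [PySem.Str.startswith_eq, PySem.Chars.startswith_iff] at this
        exact this
      · rintro ⟨o, ho, hne, hpre⟩
        refine ⟨o, ho, ?_⟩
        rw [Bool.and_eq_true, Bool.not_eq_true', beq_eq_false_iff_ne]
        exact ⟨hne, by rw [PySem.Str.startswith_eq, PySem.Chars.startswith_iff]; exact hpre⟩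
    have hB : u ∈ pvDrop urls ↔ (∃ o ∈ urls, o ≠ u ∧ u.toList <+: o.toList) := by
      rw [hmem, pv_main urls u hu]
      constructor
      · rintro ⟨⟨p1, p2⟩, hp, hq, hp1⟩
        rw [pv_mem_zip_tail] at hp
        obtain ⟨i, hlen, ha, hb⟩ := hp
        dsimp only at hq hp1
        subst hp1
        refine ⟨i, hlen, by rw [ha], ?_⟩
        rw [Bool.and_eq_true] at hq
        have hs := hq.2
        rw [PySem.Str.startswith_eq, PySem.Chars.startswith_iff] at hs
        rw [hb]
        exact hs
      · rintro ⟨i, hlen, ha, hpre⟩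
        refine ⟨((pvUniq urls)[i], (pvUniq urls)[i+1]), ?_, ?_, ha⟩
        · rw [pv_mem_zip_tail]; exact ⟨i, hlen, rfl, rfl⟩
        · rw [Bool.and_eq_true]
          refine ⟨by rw [ha]; exact hend, ?_⟩
          rw [PySem.Str.startswith_eq, PySem.Chars.startswith_iff, ha]
          exact hpre
    rw [hend, Bool.true_and]
    cases hc : PySem.Set.contains (pvDrop urls) u with
    | true => exact hA.mpr (hB.mp ((PySem.Set.contains_iff _ _).mp hc))
    | false =>
      by_contra hany
      rw [Bool.not_eq_false] at hany
      have hmem2 := hB.mpr (hA.mp hany)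
      rw [← PySem.Set.contains_iff] at hmem2
      rw [hmem2] at hc
      cases hc
  · -- u does not end with '-': A keeps it, and it never enters the drop set
    rw [Bool.not_eq_true] at hend
    rw [hend, Bool.false_and]
    cases hc : PySem.Set.contains (pvDrop urls) u with
    | false => rfl
    | true =>
      exfalso
      have hmem2 := (PySem.Set.contains_iff _ _).mp hc
      unfold pvDrop at hmem2
      rw [pv_mem_drop_foldl] at hmem2
      rcases hmem2 with h | ⟨p, -, hq, hp1⟩
      · simp [PySem.Set.empty] at h
      · rw [Bool.and_eq_true] at hq
        rw [hp1, hend] at hq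
        exact Bool.false_ne_true hq.1
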